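-- pv_equiv track=rewrite | github.com/chebozh/coding_challenges_solutions | edabit_solutions/lvl2_lvl3/holey_sort.py | holey_sort
-- ===== SOURCE A (Python) =====
-- def holey_sort(lst):
--     letter_holes = {
--         '0': 1,
--         '4': 1,
--         '6': 1,
--         '8': 2,
--         '9': 1,
--     }
--     holes_score = lambda x: sum(letter_holes.get(ch, 0) for ch in x)
--     lst_str = (str(n) for n in lst)
--     return list(map(int, sorted(lst_str, key=holes_score)))
-- ===== SOURCE B (Python) =====
-- def holey_sort(lst):
--     holes = {'0': 1, '4': 1, '6': 1, '8': 2, '9': 1}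
--     pairs = [(sum(holes.get(c, 0) for c in s), s) for s in map(str, lst)]
--     m = 0
--     for score, _ in pairs:
--         m = max(m, score)
--     return [int(s) for v in range(m + 1) for score, s in pairs if score == v]
-- ===== Notes on version B (the rewrite author's own statement) =====
-- stated objective: alternative
-- what changed: Replaced the comparison sort (sorted on stringified numbers with a holes key) by a counting/bucket pass: score each number once, compute the max score with a running-max loop, then emit the list by sweeping scores 0..max and collecting matching numbers in input order.
import Mathlib
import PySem

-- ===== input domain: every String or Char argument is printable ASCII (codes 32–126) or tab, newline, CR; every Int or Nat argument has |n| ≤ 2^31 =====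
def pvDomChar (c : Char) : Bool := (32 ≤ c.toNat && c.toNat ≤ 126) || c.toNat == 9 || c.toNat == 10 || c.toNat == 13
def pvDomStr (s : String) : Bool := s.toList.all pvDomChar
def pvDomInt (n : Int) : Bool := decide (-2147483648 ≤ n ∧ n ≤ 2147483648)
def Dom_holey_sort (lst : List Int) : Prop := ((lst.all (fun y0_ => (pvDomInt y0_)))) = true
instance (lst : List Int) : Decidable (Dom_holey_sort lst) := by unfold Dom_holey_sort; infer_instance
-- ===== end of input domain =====

-- B replaces the comparison sort by a stable counting/bucket pass over scores 0..max (same return value; objective: alternative).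


-- ===== PORT A =====
def letterHoles : PySem.Dict Char Int :=
  PySem.Dict.ofList [('0', 1), ('4', 1), ('6', 1), ('8', 2), ('9', 1)]

-- holes_score = lambda x: sum(letter_holes.get(ch, 0) for ch in x)
def holesScore (x : String) : Int :=
  (x.toList.map (fun ch => PySem.Dict.getD letterHoles ch 0)).sum

-- int(s) is applied only to strings produced by str(n), where it always succeeds; getD 0 just unwraps the some
def holey_sort (lst : List Int) : List Int :=
  let lst_str := lst.map PySem.Int.toStr
  (PySem.List.sorted lst_str holesScore false).map (fun s => (PySem.Int.ofStr? s).getD 0)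

-- ===== PORT B =====
def holesB : PySem.Dict Char Int :=
  PySem.Dict.ofList [('0', 1), ('4', 1), ('6', 1), ('8', 2), ('9', 1)]

def holey_sort_alt (lst : List Int) : List Int :=
  let pairs := (lst.map PySem.Int.toStr).map
    (fun s => ((s.toList.map (fun c => PySem.Dict.getD holesB c 0)).sum, s))
  let m := pairs.foldl (fun m p => max m p.1) 0
  (PySem.List.pyRange 0 (m + 1)).flatMap
    (fun v => (pairs.filter (fun p => p.1 == v)).map (fun p => (PySem.Int.ofStr? p.2).getD 0))

-- ===== PRECONDITION & SPEC =====
def Spec_holey_sort (lst : List Int) (out : List Int) : Prop := out = holey_sort_alt lst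
instance (lst : List Int) (out : List Int) : Decidable (Spec_holey_sort lst out) := by unfold Spec_holey_sort; infer_instance

-- ===== CLAIM (what is proved, stated in full; the proofs are below) =====
def Claim_equal_holey_sort : Prop := ∀ (lst : List Int), Dom_holey_sort lst → Spec_holey_sort lst (holey_sort lst)

-- ===== LEMMAS AND PROOFS =====

lemma holeyVal_nonneg (c : Char) : 0 ≤ PySem.Dict.getD letterHoles c 0 := by
  rw [PySem.Dict.getD_eq_get?_getD]
  rcases h : letterHoles.get? c with _ | v
  · simp
  · have hm := PySem.Dict.mem_items_of_get?_eq_some (d := letterHoles) h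
    have hi : letterHoles.items = [('0', 1), ('4', 1), ('6', 1), ('8', 2), ('9', 1)] := by decide
    rw [hi] at hm
    simp only [List.mem_cons, List.not_mem_nil, or_false, Prod.mk.injEq] at hm
    rcases hm with ⟨_, rfl⟩ | ⟨_, rfl⟩ | ⟨_, rfl⟩ | ⟨_, rfl⟩ | ⟨_, rfl⟩ <;> norm_num

lemma holesScore_nonneg (s : String) : 0 ≤ holesScore s := by
  apply List.sum_nonneg
  intro x hx
  obtain ⟨c, _, rfl⟩ := List.mem_map.mp hx
  exact holeyVal_nonneg c

-- insertBy passes over a prefix it does not go before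
lemma insertBy_append_left {α : Type} (before : α → α → Bool) (x : α) (l r : List α)
    (h : ∀ y ∈ l, before x y = false) :
    PySem.List.insertBy before x (l ++ r) = l ++ PySem.List.insertBy before x r := by
  induction l with
  | nil => simp
  | cons a t ih =>
      have ha : before x a = false := h a (List.mem_cons_self ..)
      simp only [List.cons_append, PySem.List.insertBy, ha, Bool.false_eq_true,
        if_false, List.cons_inj_right]
      exact ih (fun y hy => h y (List.mem_cons_of_mem _ hy))

lemma insertBy_front {α : Type} (before : α → α → Bool) (x : α) (l : List α)
    (h : ∀ y ∈ l, before x y = true) :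
    PySem.List.insertBy before x l = x :: l := by
  cases l with
  | nil => simp [PySem.List.insertBy]
  | cons a t => simp [PySem.List.insertBy, h a (List.mem_cons_self ..)]

lemma flatMap_congr_mem {α β : Type} {l : List α} {f g : α → List β}
    (h : ∀ a ∈ l, f a = g a) : l.flatMap f = l.flatMap g := by
  induction l with
  | nil => rfl
  | cons a t ih =>
      simp only [List.flatMap_cons, h a (List.mem_cons_self ..),
        ih (fun y hy => h y (List.mem_cons_of_mem _ hy))]

-- the stable sort is the concatenation of the input-order buckets, taken over any
-- strictly increasing list of values covering all keys
lemma sorted_eq_buckets {α : Type} (key : α → Int) (xs : List α) (vs : List Int)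
    (hvs : vs.Pairwise (· < ·)) (hmem : ∀ y ∈ xs, key y ∈ vs) :
    PySem.List.sorted xs key false = vs.flatMap (fun v => xs.filter (fun y => key y == v)) := by
  induction xs using List.reverseRecOn with
  | nil => simp [PySem.List.sorted_eq_foldl_insertBy]
  | append_singleton xs x ih =>
      have hx : key x ∈ vs := hmem x (by simp)
      have hxs : ∀ y ∈ xs, key y ∈ vs := fun y hy => hmem y (by simp [hy])
      obtain ⟨A, B, rfl⟩ := List.append_of_mem hx
      rw [List.pairwise_append] at hvs
      obtain ⟨hA, hBx, hcross⟩ := hvs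
      rw [List.pairwise_cons] at hBx
      have hPA : ∀ a ∈ A, a < key x := fun a ha => hcross a ha (key x) (List.mem_cons_self ..)
      have hPB : ∀ b ∈ B, key x < b := hBx.1
      have hstep : PySem.List.sorted (xs ++ [x]) key false
          = PySem.List.insertBy (fun a b => decide (key a < key b)) x
              (PySem.List.sorted xs key false) := by
        rw [PySem.List.sorted_eq_foldl_insertBy, PySem.List.sorted_eq_foldl_insertBy,
          List.foldl_append]
        rfl
      rw [hstep, ih hxs]
      -- abbreviations
      have hsplit : (A ++ key x :: B).flatMap (fun v => xs.filter (fun y => key y == v))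
          = (A.flatMap (fun v => xs.filter (fun y => key y == v))
              ++ xs.filter (fun y => key y == key x))
            ++ B.flatMap (fun v => xs.filter (fun y => key y == v)) := by
        simp [List.flatMap_append, List.flatMap_cons, List.append_assoc]
      rw [hsplit,
        insertBy_append_left _ _ _ _ (by
          intro y hy
          simp only [List.mem_append, List.mem_flatMap, List.mem_filter] at hy
          have hle : key y ≤ key x := by
            rcases hy with ⟨v, hv, _, he⟩ | ⟨_, he⟩
            · have := hPA v hv; have := eq_of_beq he; omega
            · have := eq_of_beq he; omega
          simp [not_lt.mpr hle]),
        insertBy_front _ _ _ (by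
          intro y hy
          simp only [List.mem_flatMap, List.mem_filter] at hy
          obtain ⟨v, hv, _, he⟩ := hy
          have := hPB v hv; have := eq_of_beq he
          simp; omega)]
      -- now compute the RHS buckets of xs ++ [x]
      have hfA : ∀ v ∈ A, (xs ++ [x]).filter (fun y => key y == v)
          = xs.filter (fun y => key y == v) := by
        intro v hv
        have : key x ≠ v := by have := hPA v hv; omega
        simp [List.filter_append, this]
      have hfB : ∀ v ∈ B, (xs ++ [x]).filter (fun y => key y == v)
          = xs.filter (fun y => key y == v) := by
        intro v hv
        have : key x ≠ v := by have := hPB v hv; omega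
        simp [List.filter_append, this]
      rw [List.flatMap_append, List.flatMap_cons,
        flatMap_congr_mem hfA, flatMap_congr_mem (fun v hv => hfB v hv)]
      simp [List.filter_append, List.append_assoc]

-- ===== VERDICT (by name: the statement is the Claim_ definition above) =====
theorem holey_sort_spec : Claim_equal_holey_sort := by
  intro lst _
  unfold Spec_holey_sort
  show (PySem.List.sorted (lst.map PySem.Int.toStr) holesScore false).map
      (fun s => (PySem.Int.ofStr? s).getD 0)
    = (PySem.List.pyRange 0
        ((((lst.map PySem.Int.toStr).map (fun s => (holesScore s, s))).foldl
            (fun m p => max m p.1) 0) + 1)).flatMap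
        (fun v => (((lst.map PySem.Int.toStr).map (fun s => (holesScore s, s))).filter
            (fun p => p.1 == v)).map (fun p => (PySem.Int.ofStr? p.2).getD 0))
  set strs := lst.map PySem.Int.toStr with hstrs
  set pairs := strs.map (fun s => (holesScore s, s)) with hpairs
  set m := pairs.foldl (fun m p => max m p.1) 0 with hm
  obtain ⟨hm0, hub⟩ := PySem.List.le_foldl_max_int pairs (fun p => p.1) 0
  have hmnat : m + 1 = ((m + 1).toNat : Int) := by omega
  have hpair : (PySem.List.pyRange 0 (m + 1)).Pairwise (· < ·) := by
    rw [hmnat, PySem.List.pyRange_zero_natCast]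
    exact (List.pairwise_lt_range).map _ (fun a b h => by exact_mod_cast h)
  have hmemv : ∀ s ∈ strs, holesScore s ∈ PySem.List.pyRange 0 (m + 1) := by
    intro s hs
    refine PySem.List.mem_pyRange_one.mpr ⟨holesScore_nonneg s, ?_⟩
    have : (holesScore s, s) ∈ pairs := List.mem_map.mpr ⟨s, hs, rfl⟩
    have := hub _ this
    omega
  rw [sorted_eq_buckets holesScore strs (PySem.List.pyRange 0 (m + 1)) hpair hmemv,
    List.map_flatMap]
  apply flatMap_congr_mem
  intro v _
  simp only [hpairs, hstrs, List.filter_map, List.map_map, Function.comp_def]
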